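-- pv_equiv track=rewrite | github.com/Jutastre/AoC-2016 | d18/p2.py | sim2
-- ===== SOURCE A (Python) =====
-- def sim2(number):
--     if number <= 1:
--         return 1
--     number -= 1
--     remove = 1
--     while number > 0:
--         number -= 2**remove
--         remove += 1
--     number += 2 ** (remove - 1)
--     magic = 2 ** (remove - 2)
--     if number > magic:
--         # number-= 2**(remove-2)
--         return magic + (number - magic * 2)
--
--     return number
-- ===== SOURCE B (Python) =====
-- def sim2(number):
--     if number <= 1:
--         return 1
--     m = number.bit_length() - 1
--     num = number + 1 - 2 ** m
--     magic = 2 ** (m - 1)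
--     if num > magic:
--         return num - magic
--     return num
-- ===== Notes on version B (the rewrite author's own statement) =====
-- stated objective: simpler
-- what changed: Replaces the while loop that repeatedly subtracts growing powers of two with a closed form using number.bit_length(), and simplifies the tail arithmetic to a single subtraction.
import Mathlib
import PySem

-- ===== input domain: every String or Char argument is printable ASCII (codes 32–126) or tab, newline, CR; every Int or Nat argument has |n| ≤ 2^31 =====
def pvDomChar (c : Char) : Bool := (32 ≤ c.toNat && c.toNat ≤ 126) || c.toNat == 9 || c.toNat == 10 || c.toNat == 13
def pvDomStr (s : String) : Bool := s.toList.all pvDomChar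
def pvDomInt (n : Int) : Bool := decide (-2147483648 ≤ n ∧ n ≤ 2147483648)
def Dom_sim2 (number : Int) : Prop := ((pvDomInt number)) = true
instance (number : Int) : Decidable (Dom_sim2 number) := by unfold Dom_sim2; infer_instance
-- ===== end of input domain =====

-- B replaces A's power-subtraction while loop with a bit_length closed form (objective: simpler).

-- ===== PORT A =====
-- the while loop: subtract 2^remove, increment remove, while number > 0
def sim2Loop (n : Int) (r : Nat) : Int × Nat :=
  if n > 0 then sim2Loop (n - 2 ^ r) (r + 1) else (n, r)
termination_by n.toNat
decreasing_by
  have h2 : (0 : Int) < 2 ^ r := pow_pos (by norm_num) r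
  omega

def sim2 (number : Int) : Int :=
  if number ≤ 1 then 1
  else
    let p := sim2Loop (number - 1) 1
    let n := p.1 + 2 ^ (p.2 - 1)
    let magic : Int := 2 ^ (p.2 - 2)
    if n > magic then magic + (n - magic * 2) else n

-- ===== PORT B =====
-- exact port of Python int.bit_length on nonnegative ints
def pyBitLength (n : Nat) : Nat := if n = 0 then 0 else Nat.log2 n + 1

def sim2_alt (number : Int) : Int :=
  if number ≤ 1 then 1
  else
    let m := pyBitLength number.toNat - 1
    let num := number + 1 - 2 ^ m
    let magic : Int := 2 ^ (m - 1)
    if num > magic then num - magic else num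

-- ===== PRECONDITION & SPEC =====
def Spec_sim2 (number : Int) (out : Int) : Prop := out = sim2_alt number
instance (number : Int) (out : Int) : Decidable (Spec_sim2 number out) := by unfold Spec_sim2; infer_instance

-- ===== CLAIM (what is proved, stated in full; the proofs are below) =====
def Claim_equal_sim2 : Prop := ∀ (number : Int), Dom_sim2 number → Spec_sim2 number (sim2 number)

-- ===== LEMMAS AND PROOFS =====

-- characterization of the while loop: it stops at remove = r+k+1 where
-- 2^(r+k) < n + 2^r ≤ 2^(r+k+1)
lemma sim2Loop_char : ∀ (k r : Nat) (n : Int),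
    (2 : Int) ^ (r + k) - 2 ^ r < n → n ≤ 2 ^ (r + k + 1) - 2 ^ r →
    sim2Loop n r = (n - ((2 : Int) ^ (r + k + 1) - 2 ^ r), r + k + 1) := by
  intro k
  induction k with
  | zero =>
    intro r n h1 h2
    simp only [Nat.add_zero] at h1 h2 ⊢
    have hr : (0 : Int) < 2 ^ r := pow_pos (by norm_num) r
    have hs : (2 : Int) ^ (r + 1) = 2 ^ r * 2 := pow_succ 2 r
    rw [sim2Loop]
    rw [if_pos (by omega)]
    rw [sim2Loop]
    rw [if_neg (by omega)]
    have he : (2 : Int) ^ (r + 1) - 2 ^ r = 2 ^ r := by omega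
    rw [he]
  | succ k ih =>
    intro r n h1 h2
    have hr : (0 : Int) < 2 ^ r := pow_pos (by norm_num) r
    have hrk : (2 : Int) ^ (r + (k + 1)) = 2 ^ (r + 1 + k) := by ring_nf
    have hrk2 : (2 : Int) ^ (r + (k + 1) + 1) = 2 ^ (r + 1 + k + 1) := by ring_nf
    have hs : (2 : Int) ^ (r + 1) = 2 ^ r * 2 := pow_succ 2 r
    have hmono : (2 : Int) ^ (r + 1) ≤ 2 ^ (r + (k + 1)) :=
      pow_le_pow_right₀ (by norm_num) (by omega)
    rw [sim2Loop]
    rw [if_pos (by omega)]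
    rw [ih (r + 1) (n - 2 ^ r) (by rw [hrk] at h1; omega) (by rw [hrk2] at h2; omega)]
    simp only [Prod.mk.injEq]
    refine ⟨by rw [hrk2]; omega, by omega⟩


lemma sim2_eq_alt (number : Int) : sim2 number = sim2_alt number := by
  by_cases h : number ≤ 1
  · simp [sim2, sim2_alt, h]
  · push_neg at h
    have h2 : 2 ≤ number := by omega
    set m := Nat.log2 number.toNat with hm
    have hnz : number.toNat ≠ 0 := by omega
    have hlo : 2 ^ m ≤ number.toNat := Nat.log2_self_le hnz
    have hhi : number.toNat < 2 ^ (m + 1) := Nat.lt_log2_self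
    have hloI : (2 : Int) ^ m ≤ number := by
      calc ((2 : Int) ^ m) = ((2 ^ m : Nat) : Int) := by push_cast; ring
      _ ≤ (number.toNat : Int) := by exact_mod_cast hlo
      _ = number := by omega
    have hhiI : number < (2 : Int) ^ (m + 1) := by
      calc number = (number.toNat : Int) := by omega
      _ < ((2 ^ (m + 1) : Nat) : Int) := by exact_mod_cast hhi
      _ = (2 : Int) ^ (m + 1) := by push_cast; ring
    have hm1 : 1 ≤ m := by
      by_contra hc
      push_neg at hc
      interval_cases m
      · simp at hhiI; omega
    -- apply the loop characterization with r = 1, k = m - 1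
    have hloop := sim2Loop_char (m - 1) 1 (number - 1)
    have hrw : 1 + (m - 1) = m := by omega
    rw [hrw] at hloop
    have hpow1 : (2 : Int) ^ 1 = 2 := by norm_num
    have hres := hloop (by rw [hpow1]; omega) (by rw [hpow1]; omega)
    -- unfold both sides
    simp only [sim2, sim2_alt, if_neg (by omega : ¬ number ≤ 1)]
    rw [hres]
    have hbl : pyBitLength number.toNat - 1 = m := by
      simp [pyBitLength, hnz, ← hm]
    rw [hbl]
    simp only []
    have hms : m + 1 - 1 = m := by omega
    have hms2 : m + 1 - 2 = m - 1 := by omega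
    rw [hms, hms2]
    have hps : (2 : Int) ^ (m + 1) = 2 ^ m * 2 := pow_succ 2 m
    have hps2 : (2 : Int) ^ m = 2 ^ (m - 1) * 2 := by
      rw [← pow_succ]; congr 1; omega
    split_ifs with c1 c2 <;> omega

-- ===== VERDICT (by name: the statement is the Claim_ definition above) =====
theorem sim2_spec : Claim_equal_sim2 := by
  intro number _
  exact sim2_eq_alt number
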